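-- pv_equiv track=rewrite | github.com/YesidBelloC/NAVecoStagiaires2023 | Routage_LOTTON_Robin/StateOfArts/AnisCodeFinal/fonctions.py | speed_and_dist_cut
-- ===== SOURCE A (Python) =====
-- def speed_and_dist_cut(_dist_and_speed):
--
--     _speeds = []
--     dist_segment_speed = []
--     cut_points = []
--
--     # premiere vitesse max
--     V = _dist_and_speed[0][1]
--     _speeds.append(V)
--
--     for i in range(1, len(_dist_and_speed)):
--             if(_dist_and_speed[i][1] != V):
--                 cut_points.append(i)
--                 V = _dist_and_speed[i][1]
--                 _speeds.append(V)
--                 # ajouter la distance du segment (la où v = cst)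
--                 if(len(dist_segment_speed) > 0):
--                     dist_segment_speed.append(_dist_and_speed[i-1][0] - _dist_and_speed[cut_points[-2]-1][0] )
--                 else:
--                     dist_segment_speed.append(_dist_and_speed[i-1][0])
--
--     #ajouter la distance du dernier segment s'il y'a plus de 2 limitations de vitesse
--     if len(_speeds) > 1:
--         dist_segment_speed.append(_dist_and_speed[len(_dist_and_speed)-1][0] - _dist_and_speed[cut_points[-1]-1][0] )
--
--     # s'il y aune seule vitesse limite la distance du segment == la distance totale
--     else: # cad : len(dist_segment_speed) == 0 :
--         dist_segment_speed.append(_dist_and_speed[-1][0])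
--
--
--     return cut_points, _speeds, dist_segment_speed
-- ===== SOURCE B (Python) =====
-- def speed_and_dist_cut(_dist_and_speed):
--     # Run-length encode the rows into [speed, last_distance, count] runs, then
--     # read all three outputs off the run list: speeds = run speeds, cut points
--     # = prefix sums of the run lengths, segment distances = adjacent
--     # differences of the runs' end distances.
--     runs = []
--     for d, s in _dist_and_speed:
--         if runs and runs[-1][0] == s:
--             runs[-1][1] = d
--             runs[-1][2] += 1
--         else:
--             runs.append([s, d, 1])
--     _speeds = [r[0] for r in runs]
--     cut_points = []
--     total = 0
--     for r in runs[:-1]: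
--         total += r[2]
--         cut_points.append(total)
--     ld = [r[1] for r in runs]
--     dist_segment_speed = [ld[0]] + [b - a for a, b in zip(ld, ld[1:])]
--     return cut_points, _speeds, dist_segment_speed
-- ===== Notes on version B (the rewrite author's own statement) =====
-- stated objective: alternative
-- what changed: Replaces A's index loop with running speed and last-cut bookkeeping by a run-length encoding of the rows into (speed, last_distance, count) runs, from which speeds, cut points (prefix sums of run lengths) and segment distances (adjacent differences of run end-distances) are all read off; no boundary indices are ever computed.
import Mathlib
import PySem

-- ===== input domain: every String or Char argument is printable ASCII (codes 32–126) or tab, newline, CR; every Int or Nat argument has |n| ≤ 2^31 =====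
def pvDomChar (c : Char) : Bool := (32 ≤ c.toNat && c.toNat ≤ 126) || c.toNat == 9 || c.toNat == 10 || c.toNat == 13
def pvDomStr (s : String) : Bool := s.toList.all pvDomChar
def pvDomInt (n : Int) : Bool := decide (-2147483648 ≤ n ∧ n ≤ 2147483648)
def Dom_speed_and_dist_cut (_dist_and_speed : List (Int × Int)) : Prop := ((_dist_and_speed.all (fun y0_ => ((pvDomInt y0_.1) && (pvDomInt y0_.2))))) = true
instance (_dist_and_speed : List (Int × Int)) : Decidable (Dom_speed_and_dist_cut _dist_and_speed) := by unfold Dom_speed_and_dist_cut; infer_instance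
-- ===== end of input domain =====

-- B run-length encodes the rows into (speed, last_distance, count) runs and reads all three
-- outputs off the run list; same values as A everywhere A returns (A raises IndexError on []).

-- ===== PORT A =====
-- loop body of A's for-loop; state = (cut_points, _speeds, dist_segment_speed, V).
-- Indices are the nonnegative loop counters of range(1, n), kept as Nat; list accesses use
-- getD, exact here because within Pre_ every index A reads is in range.
def stepA (l : List (Int × Int)) (st : List Nat × List Int × List Int × Int) (i : Nat) :
    List Nat × List Int × List Int × Int :=
  let (cuts, speeds, dseg, V) := st
  if (l.getD i (0, 0)).2 ≠ V then
    (cuts ++ [i], speeds ++ [(l.getD i (0, 0)).2],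
      (if dseg.length > 0 then
          dseg ++ [(l.getD (i - 1) (0, 0)).1 - (l.getD ((cuts.getLastD 0) - 1) (0, 0)).1]
        else dseg ++ [(l.getD (i - 1) (0, 0)).1]),
      (l.getD i (0, 0)).2)
  else st

def speed_and_dist_cut (_dist_and_speed : List (Int × Int)) : List Int × List Int × List Int :=
  let V0 := (_dist_and_speed.getD 0 (0, 0)).2
  let st := (List.range' 1 (_dist_and_speed.length - 1)).foldl (stepA _dist_and_speed)
      ([], [V0], [], V0)
  let cuts := st.1
  let speeds := st.2.1
  let dseg := st.2.2.1
  let dseg2 :=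
    if speeds.length > 1 then
      dseg ++ [(_dist_and_speed.getD (_dist_and_speed.length - 1) (0, 0)).1 -
        (_dist_and_speed.getD ((cuts.getLastD 0) - 1) (0, 0)).1]
    else dseg ++ [(_dist_and_speed.getD (_dist_and_speed.length - 1) (0, 0)).1]
  (cuts.map Int.ofNat, speeds, dseg2)

-- ===== PORT B =====
-- one step of B's run-length-encoding loop over the rows (d, s):
-- runs[-1] mutation becomes dropLast ++ [updated last]
def stepB (runs : List (Int × Int × Int)) (ds : Int × Int) : List (Int × Int × Int) :=
  match runs.getLast? with
  | some r => if r.1 == ds.2 then runs.dropLast ++ [(r.1, ds.1, r.2.2 + 1)]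
              else runs ++ [(ds.2, ds.1, 1)]
  | none => [(ds.2, ds.1, 1)]

def speed_and_dist_cut_alt (_dist_and_speed : List (Int × Int)) : List Int × List Int × List Int :=
  let runs := _dist_and_speed.foldl stepB []
  let speeds := runs.map (·.1)
  let cp := (runs.dropLast).foldl
      (fun (st : List Int × Int) r => (st.1 ++ [st.2 + r.2.2], st.2 + r.2.2)) ([], 0)
  let ld := runs.map (·.2.1)
  let dseg := ld.getD 0 0 :: ((ld.zip ld.tail).map (fun ab => ab.2 - ab.1))
  (cp.1, speeds, dseg)

-- ===== PRECONDITION & SPEC =====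
-- A raises IndexError on the empty list (so does B); Pre_ excludes exactly that input.
def Pre_speed_and_dist_cut (_dist_and_speed : List (Int × Int)) : Prop := _dist_and_speed ≠ []
instance (_dist_and_speed : List (Int × Int)) : Decidable (Pre_speed_and_dist_cut _dist_and_speed) := by unfold Pre_speed_and_dist_cut; infer_instance
def pvWitness_speed_and_dist_cut : (List (Int × Int)) := [(3, 50), (7, 50), (10, 30), (15, 30)]

def Spec_speed_and_dist_cut (_dist_and_speed : List (Int × Int)) (out : List Int × List Int × List Int) : Prop := out = speed_and_dist_cut_alt _dist_and_speed
instance (_dist_and_speed : List (Int × Int)) (out : List Int × List Int × List Int) : Decidable (Spec_speed_and_dist_cut _dist_and_speed out) := by unfold Spec_speed_and_dist_cut; infer_instance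

-- ===== CLAIM (what is proved, stated in full; the proofs are below) =====
def Claim_equal_speed_and_dist_cut : Prop := ∀ (_dist_and_speed : List (Int × Int)), Dom_speed_and_dist_cut _dist_and_speed → Pre_speed_and_dist_cut _dist_and_speed → Spec_speed_and_dist_cut _dist_and_speed (speed_and_dist_cut _dist_and_speed)

-- ===== LEMMAS AND PROOFS =====

-- distance / speed read at index i (with A's getD default)
def dAt (l : List (Int × Int)) (i : Nat) : Int := (l.getD i (0, 0)).1
def sAt (l : List (Int × Int)) (i : Nat) : Int := (l.getD i (0, 0)).2

lemma fst_getD (l : List (Int × Int)) (i : Nat) : (l.getD i (0, 0)).1 = dAt l i := rfl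
lemma snd_getD (l : List (Int × Int)) (i : Nat) : (l.getD i (0, 0)).2 = sAt l i := rfl

-- the initial segments (all but the last) determined by the cut list
def fsegAux (l : List (Int × Int)) (prev : Nat) : List Nat → List Int
  | [] => []
  | b :: rest => (dAt l (b - 1) - dAt l (prev - 1)) :: fsegAux l b rest

def fseg (l : List (Int × Int)) : List Nat → List Int
  | [] => []
  | c :: cs => dAt l (c - 1) :: fsegAux l c cs

lemma fsegAux_snoc (l : List (Int × Int)) (cs : List Nat) :
    ∀ (prev i : Nat), fsegAux l prev (cs ++ [i]) =
      fsegAux l prev cs ++ [dAt l (i - 1) - dAt l ((cs.getLastD prev) - 1)] := by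
  induction cs with
  | nil => intro prev i; simp [fsegAux]
  | cons b cs ih =>
    intro prev i
    simp only [List.cons_append, fsegAux, ih b i, List.cons_append, List.getLastD_cons]

lemma fseg_snoc (l : List (Int × Int)) (cs : List Nat) (i : Nat) :
    fseg l (cs ++ [i]) =
      fseg l cs ++ (if cs = [] then [dAt l (i - 1)]
        else [dAt l (i - 1) - dAt l ((cs.getLastD 0) - 1)]) := by
  cases cs with
  | nil => simp [fseg, fsegAux]
  | cons c cs' =>
    rw [if_neg (List.cons_ne_nil c cs')]
    simp only [List.cons_append, fseg, fsegAux_snoc, List.getLastD_cons]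

lemma fseg_eq_nil_iff (l : List (Int × Int)) (cs : List Nat) : fseg l cs = [] ↔ cs = [] := by
  cases cs <;> simp [fseg]

lemma fsegAux_eq_zipmap (l : List (Int × Int)) (cs : List Nat) :
    ∀ prev, fsegAux l prev cs =
      ((prev :: cs).zip cs).map (fun pb => dAt l (pb.2 - 1) - dAt l (pb.1 - 1)) := by
  induction cs with
  | nil => intro prev; simp [fsegAux]
  | cons b cs ih => intro prev; simp [fsegAux, ih b, List.zip]

-- main characterisation of A's fold
lemma foldA_char (l : List (Int × Int)) :
    ∀ (m j : Nat) (cuts : List Nat), 1 ≤ j →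
      (List.range' j m).foldl (stepA l)
        (cuts, sAt l 0 :: cuts.map (sAt l), fseg l cuts, sAt l (j - 1)) =
      (cuts ++ (List.range' j m).filter (fun i => sAt l i ≠ sAt l (i - 1)),
       sAt l 0 :: (cuts ++ (List.range' j m).filter (fun i => sAt l i ≠ sAt l (i - 1))).map (sAt l),
       fseg l (cuts ++ (List.range' j m).filter (fun i => sAt l i ≠ sAt l (i - 1))),
       sAt l (j + m - 1)) := by
  intro m
  induction m with
  | zero => intro j cuts hj; simp
  | succ m ih =>
    intro j cuts hj
    have harith : j + 1 + m - 1 = j + (m + 1) - 1 := by omega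
    rw [List.range'_succ]
    by_cases hc : sAt l j = sAt l (j - 1)
    · have hstep : stepA l (cuts, sAt l 0 :: cuts.map (sAt l), fseg l cuts, sAt l (j - 1)) j =
          (cuts, sAt l 0 :: cuts.map (sAt l), fseg l cuts, sAt l (j - 1)) := by
        simp only [stepA, snd_getD]
        rw [if_neg (by simp [hc])]
      have hj1 : sAt l (j - 1) = sAt l (j + 1 - 1) := by
        have h : j + 1 - 1 = j := by omega
        rw [h, hc]
      have hf : List.filter (fun i => decide (sAt l i ≠ sAt l (i - 1))) (j :: List.range' (j + 1) m) =
          List.filter (fun i => decide (sAt l i ≠ sAt l (i - 1))) (List.range' (j + 1) m) := by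
        rw [List.filter_cons, if_neg (by simp [hc])]
      rw [List.foldl_cons, hstep, hj1, ih (j + 1) cuts (by omega), hf, harith]
    · have hstep : stepA l (cuts, sAt l 0 :: cuts.map (sAt l), fseg l cuts, sAt l (j - 1)) j =
          (cuts ++ [j], sAt l 0 :: (cuts ++ [j]).map (sAt l), fseg l (cuts ++ [j]), sAt l j) := by
        simp only [stepA, snd_getD, fst_getD]
        rw [if_pos hc]
        rw [fseg_snoc]
        rcases eq_or_ne cuts [] with rfl | hne
        · simp [fseg]
        · have h2 : fseg l cuts ≠ [] := by simpa [fseg_eq_nil_iff] using hne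
          simp [List.length_pos_iff.mpr h2, hne]
      have hj1 : sAt l j = sAt l (j + 1 - 1) := by
        have h : j + 1 - 1 = j := by omega
        rw [h]
      have hf : List.filter (fun i => decide (sAt l i ≠ sAt l (i - 1))) (j :: List.range' (j + 1) m) =
          j :: List.filter (fun i => decide (sAt l i ≠ sAt l (i - 1))) (List.range' (j + 1) m) := by
        rw [List.filter_cons, if_pos (by simpa using hc)]
      rw [List.foldl_cons, hstep, hj1, ih (j + 1) (cuts ++ [j]) (by omega), hf, harith]
      simp [List.append_assoc]

-- the run list determined by a cut list: current run started at `start` with `cnt` rows so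
-- far; remaining cuts `cs`; `last` = final row index
def runsSeg (l : List (Int × Int)) : Nat → Int → List Nat → Nat → List (Int × Int × Int)
  | start, cnt, [], last => [(sAt l start, dAt l last, cnt + ((last : Int) - (start : Int)))]
  | start, cnt, c :: cs, last =>
      (sAt l start, dAt l (c - 1), cnt + ((c : Int) - 1 - (start : Int))) :: runsSeg l c 1 cs last

lemma runsSeg_ne_nil (l : List (Int × Int)) (start : Nat) (cnt : Int) (cs : List Nat) (last : Nat) :
    runsSeg l start cnt cs last ≠ [] := by
  cases cs <;> simp [runsSeg]

lemma runsSeg_shift (l : List (Int × Int)) (j : Nat) (hj : 1 ≤ j)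
    (hc : sAt l j = sAt l (j - 1)) (cnt : Int) (cs : List Nat) (last : Nat) :
    runsSeg l j (cnt + 1) cs last = runsSeg l (j - 1) cnt cs last := by
  cases cs with
  | nil =>
    simp only [runsSeg, hc]
    rw [show cnt + 1 + ((last : Int) - (j : Int)) =
        cnt + ((last : Int) - ((j - 1 : Nat) : Int)) from by omega]
  | cons c cs' =>
    simp only [runsSeg, hc]
    rw [show cnt + 1 + ((c : Int) - 1 - (j : Int)) =
        cnt + ((c : Int) - 1 - ((j - 1 : Nat) : Int)) from by omega]

-- main characterisation of B's run-building fold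
lemma foldB_char (l : List (Int × Int)) :
    ∀ (m j : Nat) (done : List (Int × Int × Int)) (cnt : Int), 1 ≤ j →
      (List.range' j m).foldl (fun rs i => stepB rs (l.getD i (0, 0)))
        (done ++ [(sAt l (j - 1), dAt l (j - 1), cnt)]) =
      done ++ runsSeg l (j - 1) cnt
        ((List.range' j m).filter (fun i => sAt l i ≠ sAt l (i - 1))) (j + m - 1) := by
  intro m
  induction m with
  | zero =>
    intro j done cnt hj
    simp only [List.range'_zero, List.foldl_nil, List.filter_nil, runsSeg, Nat.add_zero]
    simp
  | succ m ih =>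
    intro j done cnt hj
    have harith : j + 1 + m - 1 = j + (m + 1) - 1 := by omega
    rw [List.range'_succ, List.foldl_cons]
    by_cases hc : sAt l j = sAt l (j - 1)
    · have hstep : stepB (done ++ [(sAt l (j - 1), dAt l (j - 1), cnt)]) (l.getD j (0, 0)) =
          done ++ [(sAt l (j + 1 - 1), dAt l (j + 1 - 1), cnt + 1)] := by
        simp only [stepB, List.getLast?_concat, List.dropLast_concat, snd_getD, fst_getD]
        rw [if_pos (by simp [hc])]
        have h1 : j + 1 - 1 = j := by omega
        rw [h1, hc]
      have hf : List.filter (fun i => decide (sAt l i ≠ sAt l (i - 1))) (j :: List.range' (j + 1) m) =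
          List.filter (fun i => decide (sAt l i ≠ sAt l (i - 1))) (List.range' (j + 1) m) := by
        rw [List.filter_cons, if_neg (by simp [hc])]
      rw [hstep, ih (j + 1) done (cnt + 1) (by omega), hf, harith]
      congr 1
      have h1 : j + 1 - 1 = j := by omega
      rw [h1, runsSeg_shift l j hj hc]
    · have hstep : stepB (done ++ [(sAt l (j - 1), dAt l (j - 1), cnt)]) (l.getD j (0, 0)) =
          (done ++ [(sAt l (j - 1), dAt l (j - 1), cnt)]) ++
            [(sAt l (j + 1 - 1), dAt l (j + 1 - 1), 1)] := by
        simp only [stepB, List.getLast?_concat, snd_getD, fst_getD]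
        rw [if_neg (by simpa using fun h => hc h.symm)]
        have h1 : j + 1 - 1 = j := by omega
        rw [h1]
      have hf : List.filter (fun i => decide (sAt l i ≠ sAt l (i - 1))) (j :: List.range' (j + 1) m) =
          j :: List.filter (fun i => decide (sAt l i ≠ sAt l (i - 1))) (List.range' (j + 1) m) := by
        rw [List.filter_cons, if_pos (by simpa using hc)]
      rw [hstep, ih (j + 1) (done ++ [(sAt l (j - 1), dAt l (j - 1), cnt)]) 1 (by omega), hf, harith]
      rw [List.append_assoc]
      congr 1
      have h1 : j + 1 - 1 = j := by omega
      rw [h1]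
      simp only [runsSeg, List.singleton_append]
      rw [show cnt + ((j : Int) - 1 - ((j - 1 : Nat) : Int)) = cnt from by omega]

lemma runsSeg_map_fst (l : List (Int × Int)) :
    ∀ (cs : List Nat) (start : Nat) (cnt : Int) (last : Nat),
      (runsSeg l start cnt cs last).map (·.1) = sAt l start :: cs.map (sAt l) := by
  intro cs
  induction cs with
  | nil => intro start cnt last; simp [runsSeg]
  | cons c cs ih => intro start cnt last; simp [runsSeg, ih c 1 last]

lemma runsSeg_map_ld (l : List (Int × Int)) :
    ∀ (cs : List Nat) (start : Nat) (cnt : Int) (last : Nat),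
      (runsSeg l start cnt cs last).map (·.2.1) =
        cs.map (fun c => dAt l (c - 1)) ++ [dAt l last] := by
  intro cs
  induction cs with
  | nil => intro start cnt last; simp [runsSeg]
  | cons c cs ih => intro start cnt last; simp [runsSeg, ih c 1 last]

-- prefix sums of the run lengths of all but the last run give the cut indices
lemma runsSeg_cuts (l : List (Int × Int)) :
    ∀ (cs : List Nat) (start : Nat) (cnt T : Int) (last : Nat) (done : List Int),
      T = (start : Int) + 1 - cnt →
      ((runsSeg l start cnt cs last).dropLast.foldl
          (fun (st : List Int × Int) r => (st.1 ++ [st.2 + r.2.2], st.2 + r.2.2)) (done, T)).1 =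
        done ++ cs.map Int.ofNat := by
  intro cs
  induction cs with
  | nil => intro start cnt T last done hT; simp [runsSeg]
  | cons c cs ih =>
    intro start cnt T last done hT
    rw [show runsSeg l start cnt (c :: cs) last =
        (sAt l start, dAt l (c - 1), cnt + ((c : Int) - 1 - (start : Int))) ::
          runsSeg l c 1 cs last from rfl,
      List.dropLast_cons_of_ne_nil (runsSeg_ne_nil l c 1 cs last), List.foldl_cons]
    have hT2 : T + (cnt + ((c : Int) - 1 - (start : Int))) = Int.ofNat c := by
      rw [hT]; simp [Int.ofNat_eq_natCast]; ring
    rw [hT2, ih c 1 (Int.ofNat c) last (done ++ [Int.ofNat c])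
      (by simp [Int.ofNat_eq_natCast])]
    simp

-- fold over a list as a fold over its index range
lemma foldl_eq_range' {α β : Type} (f : β → α → β) (d : α) :
    ∀ (tail pre : List α) (b : β),
      tail.foldl f b =
        (List.range' pre.length tail.length).foldl (fun b i => f b ((pre ++ tail).getD i d)) b := by
  intro tail
  induction tail with
  | nil => intro pre b; simp
  | cons a ts ih =>
    intro pre b
    rw [List.foldl_cons, List.length_cons, List.range'_succ, List.foldl_cons]
    have h1 : (pre ++ a :: ts).getD pre.length d = a := by
      simp [List.getD]
    rw [h1]
    have h2 := ih (pre ++ [a]) (f b a)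
    simpa [List.append_assoc] using h2

lemma getLast?_getD_cons {α : Type} (cs : List α) :
    ∀ (c d : α), ((c :: cs).getLast?.getD d) = cs.getLast?.getD c := by
  induction cs with
  | nil => intro c d; rfl
  | cons b bs ih =>
    intro c d
    rw [List.getLast?_cons_cons, ih b d, ← ih b c]

-- ===== VERDICT (by name: the statement is the Claim_ definition above) =====
theorem speed_and_dist_cut_spec : Claim_equal_speed_and_dist_cut := by
  intro l _ hpre
  unfold Spec_speed_and_dist_cut
  have hlen : 1 ≤ l.length := List.length_pos_iff.mpr hpre
  -- A's side
  have hfold := foldA_char l (l.length - 1) 1 [] (le_refl 1)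
  rw [show fseg l ([] : List Nat) = [] from rfl] at hfold
  simp only [List.nil_append, List.map_nil, Nat.sub_self] at hfold
  -- B's runs
  have hB : l.foldl stepB [] =
      runsSeg l 0 1 ((List.range' 1 (l.length - 1)).filter (fun i => sAt l i ≠ sAt l (i - 1)))
        (l.length - 1) := by
    rw [foldl_eq_range' stepB (0, 0) l [] []]
    rw [show (([] : List (Int × Int)) ++ l) = l from rfl, List.length_nil]
    rw [show List.range' 0 l.length = 0 :: List.range' 1 (l.length - 1) from by
      rw [show l.length = (l.length - 1) + 1 from by omega, List.range'_succ]
      simp]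
    rw [List.foldl_cons]
    have h0 : stepB [] (l.getD 0 (0, 0)) = [] ++ [(sAt l (1 - 1), dAt l (1 - 1), 1)] := by
      simp [stepB, sAt, dAt]
    rw [h0, foldB_char l (l.length - 1) 1 [] 1 (le_refl 1)]
    rw [show 1 + (l.length - 1) - 1 = l.length - 1 from by omega]
    rfl
  simp only [speed_and_dist_cut, speed_and_dist_cut_alt, snd_getD, fst_getD]
  rw [hfold, hB]
  set cutsN := (List.range' 1 (l.length - 1)).filter (fun i => sAt l i ≠ sAt l (i - 1)) with hcuts
  dsimp only
  have hcp := runsSeg_cuts l cutsN 0 1 0 (l.length - 1) [] (by norm_num)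
  rw [hcp, List.nil_append]
  have hsp := runsSeg_map_fst l cutsN 0 1 (l.length - 1)
  have hld := runsSeg_map_ld l cutsN 0 1 (l.length - 1)
  rw [hsp, hld]
  refine Prod.ext ?_ (Prod.ext rfl ?_)
  · rfl
  · -- the segment-distance lists agree
    cases hFc : cutsN with
    | nil =>
      simp [fseg]
    | cons c cs =>
      have hlenS : (sAt l 0 :: (c :: cs).map (sAt l)).length > 1 := by simp
      rw [if_pos hlenS]
      -- B's ld written as a single map over (c :: cs) ++ [last + 1]
      have hldmap : ((c :: cs).map (fun x => dAt l (x - 1)) ++ [dAt l (l.length - 1)]) =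
          ((c :: cs) ++ [l.length - 1 + 1]).map (fun x => dAt l (x - 1)) := by
        simp
      rw [hldmap]
      set T : List Nat := cs ++ [l.length - 1 + 1] with hT
      have hsplit : ((c :: cs) ++ [l.length - 1 + 1]).map (fun x => dAt l (x - 1)) =
          dAt l (c - 1) :: T.map (fun x => dAt l (x - 1)) := by
        simp [hT]
      rw [hsplit]
      simp only [List.getD_cons_zero, List.tail_cons]
      have hzip : ((dAt l (c - 1) :: T.map (fun x => dAt l (x - 1))).zip
            (T.map (fun x => dAt l (x - 1)))).map (fun ab => ab.2 - ab.1) =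
          ((c :: T).zip T).map (fun pb => dAt l (pb.2 - 1) - dAt l (pb.1 - 1)) := by
        rw [show (dAt l (c - 1) :: T.map (fun x => dAt l (x - 1))) =
            (c :: T).map (fun x => dAt l (x - 1)) from rfl, List.zip_map, List.map_map]
        rfl
      rw [hzip, ← fsegAux_eq_zipmap l T c, hT, fsegAux_snoc]
      simp [fseg, getLast?_getD_cons]
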